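-- pv_equiv track=rewrite | github.com/PeterKrisanda/Diploma-thesis- | unix/testmaker.py | make_text_rights
-- ===== SOURCE A (Python) =====
-- def make_text_rights(rights):
--     """Vytvori sa textovy zapis pouzivatelsky prav """
--
--     text_rights = ""
--
--     for one in rights[0]:
--
--         if one == 4 or one == 6 or one == 5 or one == 7:
--
--             text_rights += "R"
--         else:
--             text_rights += "-"
--
--         if one == 2 or one == 3 or one == 6 or one == 7:
--             text_rights += "W"
--         else:
--             text_rights += "-"
--
--         if one == 1 or one == 3 or one == 5 or one == 7:
--             text_rights += "X"
--         else:
--             text_rights += "-"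
--
--         text_rights += " "
--
--     return text_rights
-- ===== SOURCE B (Python) =====
-- _TABLE = {0: "---", 1: "--X", 2: "-W-", 3: "-WX",
--           4: "R--", 5: "R-X", 6: "RW-", 7: "RWX"}
--
--
-- def make_text_rights(rights):
--     """Vytvori sa textovy zapis pouzivatelsky prav """
--     return "".join(_TABLE.get(one, "---") + " " for one in rights[0])
-- ===== Notes on version B (the rewrite author's own statement) =====
-- stated objective: simpler
-- what changed: Replaces the three per-digit conditional append blocks by a single precomputed digit-to-'rwx'-string table and one ''.join over the first row.
import Mathlib
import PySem

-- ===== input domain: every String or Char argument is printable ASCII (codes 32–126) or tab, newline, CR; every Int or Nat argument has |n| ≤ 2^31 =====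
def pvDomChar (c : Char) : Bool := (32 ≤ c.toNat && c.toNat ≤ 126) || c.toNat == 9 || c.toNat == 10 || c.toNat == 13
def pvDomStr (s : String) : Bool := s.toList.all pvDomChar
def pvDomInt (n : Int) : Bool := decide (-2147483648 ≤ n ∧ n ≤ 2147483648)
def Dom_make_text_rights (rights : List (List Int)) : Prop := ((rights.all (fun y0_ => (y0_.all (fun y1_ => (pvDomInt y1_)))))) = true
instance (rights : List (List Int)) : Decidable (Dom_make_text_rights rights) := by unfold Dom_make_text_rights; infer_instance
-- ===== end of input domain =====

-- B replaces A's three conditional blocks by one digit→"rwx" lookup table joined in a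
-- single pass; equally fast, simpler.  Both raise IndexError on rights = [] (see Pre_).

-- ===== PORT A =====
-- A iterates over rights[0], appending 'R'/'W'/'X' or '-' per three if-chains, then ' '.
-- The string accumulator is ported as List Char (Lean's own String.append is kernel-opaque).
def make_text_rights (rights : List (List Int)) : String :=
  match rights with
  | [] => ""   -- Python raises IndexError on rights[0] here; excluded by Pre_
  | row :: _ =>
    String.mk (row.foldl (fun text_rights one =>
      let text_rights := text_rights ++
        (if one = 4 ∨ one = 6 ∨ one = 5 ∨ one = 7 then ['R'] else ['-'])
      let text_rights := text_rights ++
        (if one = 2 ∨ one = 3 ∨ one = 6 ∨ one = 7 then ['W'] else ['-'])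
      let text_rights := text_rights ++
        (if one = 1 ∨ one = 3 ∨ one = 5 ∨ one = 7 then ['X'] else ['-'])
      text_rights ++ [' ']) [])

-- ===== PORT B =====
-- the module-level _TABLE dict of Source B (values as List Char, same char-level convention)
def pvTable : PySem.Dict Int (List Char) :=
  PySem.Dict.ofList
    [(0, "---".toList), (1, "--X".toList), (2, "-W-".toList), (3, "-WX".toList),
     (4, "R--".toList), (5, "R-X".toList), (6, "RW-".toList), (7, "RWX".toList)]

-- ''.join(_TABLE.get(one, "---") + " " for one in rights[0])
def make_text_rights_alt (rights : List (List Int)) : String :=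
  match rights with
  | [] => ""   -- Python raises IndexError on rights[0] here; excluded by Pre_
  | row :: _ =>
    String.mk ((row.map (fun one => pvTable.getD one "---".toList ++ [' '])).flatten)

-- ===== PRECONDITION & SPEC =====
-- Pre_ excludes only rights = [], on which both Pythons raise IndexError at rights[0].
def Pre_make_text_rights (rights : List (List Int)) : Prop := rights ≠ []
instance (rights : List (List Int)) : Decidable (Pre_make_text_rights rights) := by
  unfold Pre_make_text_rights; infer_instance

def pvWitness_make_text_rights : List (List Int) := [[4, 7, 0], [1]]

def Spec_make_text_rights (rights : List (List Int)) (out : String) : Prop := out = make_text_rights_alt rights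
instance (rights : List (List Int)) (out : String) : Decidable (Spec_make_text_rights rights out) := by unfold Spec_make_text_rights; infer_instance

-- ===== CLAIM (what is proved, stated in full; the proofs are below) =====
def Claim_equal_make_text_rights : Prop := ∀ (rights : List (List Int)), Dom_make_text_rights rights → Pre_make_text_rights rights → Spec_make_text_rights rights (make_text_rights rights)

-- ===== LEMMAS AND PROOFS =====

-- the per-digit strings agree: A's three if-chains vs B's table lookup with default
lemma pv_elem_eq (one : Int) :
    ((if one = 4 ∨ one = 6 ∨ one = 5 ∨ one = 7 then ['R'] else ['-']) ++
      (if one = 2 ∨ one = 3 ∨ one = 6 ∨ one = 7 then ['W'] else ['-']) ++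
      (if one = 1 ∨ one = 3 ∨ one = 5 ∨ one = 7 then ['X'] else ['-']) ++ [' '])
    = pvTable.getD one "---".toList ++ [' '] := by
  rcases eq_or_ne one 0 with h | h0; · subst h; decide
  rcases eq_or_ne one 1 with h | h1; · subst h; decide
  rcases eq_or_ne one 2 with h | h2; · subst h; decide
  rcases eq_or_ne one 3 with h | h3; · subst h; decide
  rcases eq_or_ne one 4 with h | h4; · subst h; decide
  rcases eq_or_ne one 5 with h | h5; · subst h; decide
  rcases eq_or_ne one 6 with h | h6; · subst h; decide
  rcases eq_or_ne one 7 with h | h7; · subst h; decide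
  have htab : pvTable = PySem.Dict.mk
      [(0, "---".toList), (1, "--X".toList), (2, "-W-".toList), (3, "-WX".toList),
       (4, "R--".toList), (5, "R-X".toList), (6, "RW-".toList), (7, "RWX".toList)] := by
    decide
  rw [htab]
  simp [PySem.Dict.getD, PySem.Dict.get?, h1, h2, h3, h4, h5, h6, h7,
        Ne.symm h0, Ne.symm h1, Ne.symm h2, Ne.symm h3,
        Ne.symm h4, Ne.symm h5, Ne.symm h6, Ne.symm h7]

-- ===== VERDICT (by name: the statement is the Claim_ definition above) =====
theorem make_text_rights_spec : Claim_equal_make_text_rights := by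
  intro rights _ hpre
  cases rights with
  | nil => exact absurd rfl hpre
  | cons row rest =>
    unfold Spec_make_text_rights
    show String.mk _ = String.mk _
    have hfold :
        row.foldl (fun text_rights one =>
          let text_rights := text_rights ++
            (if one = 4 ∨ one = 6 ∨ one = 5 ∨ one = 7 then ['R'] else ['-'])
          let text_rights := text_rights ++
            (if one = 2 ∨ one = 3 ∨ one = 6 ∨ one = 7 then ['W'] else ['-'])
          let text_rights := text_rights ++
            (if one = 1 ∨ one = 3 ∨ one = 5 ∨ one = 7 then ['X'] else ['-'])
          text_rights ++ [' ']) [] =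
        row.foldl (fun acc one =>
          acc ++ (pvTable.getD one "---".toList ++ [' '])) [] := by
      apply PySem.List.foldl_congr_mem
      intro acc one _
      simp only [List.append_assoc]
      rw [← pv_elem_eq one]
      simp [List.append_assoc]
    rw [hfold, PySem.List.foldl_append_eq_flatMap, List.flatMap_def, List.nil_append]
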